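-- pv_equiv track=rewrite | github.com/ShristiShrestha/fmindex | BWT/bwt_DC3.py | create_s0
-- ===== SOURCE A (Python) =====
-- def bucketsort(current_text, sa, s0=False):
--     triplet_idx = 2
--     if s0:
--         triplet_idx = 0
--     sorted_sa = sa
--
--     # sort the sa
--     for i in range(triplet_idx, -1, -1):
--         buckets = dict()
--
--         for text_idx in sorted_sa:
--             triplet = get_triplet(current_text, text_idx)
--             checked_i = i if i < len(triplet) else len(triplet) - 1
--             if triplet[checked_i] not in buckets:
--                 buckets[triplet[checked_i]] = []
--             buckets[triplet[checked_i]].append(text_idx)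
--         sorted_sa = []
--         for key in sorted(buckets.keys()):
--             sorted_sa += buckets[key]
--     # get the ranks
--     ranks = dict()
--     rank = 1
--
--     for text_idx in sorted_sa:
--         triplet = ''.join([str(x) for x in get_triplet(current_text, text_idx)])
--         if triplet not in ranks:
--             ranks[triplet] = rank
--             rank += 1
--
--     # combine s12 and ranks
--     s12_with_ranks = [(ranks.get(''.join([str(x) for x in get_triplet(current_text, idx_original)])), idx_original) for
--                       idx_original in sa]
--     return s12_with_ranks
--
-- def get_triplet(text, idx):
--     triplet = []
--     for text_idx in range(idx, min(idx + 3, len(text))):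
--         triplet.append(text[text_idx])
--     while len(triplet) < 3 and isinstance(triplet, str):
--         triplet.append("$")
--     return triplet
--
-- def create_s0(text, s12):
--     s0_unsorted = []
--
--     # create the s0 sorted by the second letter
--     for idx_text in s12:
--         if ((idx_text - 1) % 3) == 0:
--             s0_unsorted.append(idx_text - 1)
--
--     if len(text) % 3 == 1:
--         s0_unsorted.insert(0, len(text) - 1)
--     # sort the s0 - but only the by the first letter
--     s0_with_ranks = bucketsort(text, s0_unsorted, s0=True)
--     # extract the values for s0
--     s0 = [x[1] for x in sorted(s0_with_ranks, key=lambda x: x[0])]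
--     return s0
-- ===== SOURCE B (Python) =====
-- def create_s0(text, s12):
--     n = len(text)
--     s0 = [x - 1 for x in s12 if (x - 1) % 3 == 0]
--     if n % 3 == 1:
--         s0.insert(0, n - 1)
--     # one grouping pass: full triplet -> its indices, groups in first-appearance order
--     groups = {}
--     for idx in s0:
--         groups.setdefault(text[idx:idx + 3], []).append(idx)
--     out = []
--     # sort only the distinct triplets by their first character; stability keeps
--     # first-appearance order among triplets sharing a first character
--     for t in sorted(groups, key=lambda t: t[0]):
--         out += groups[t]
--     return out
-- ===== Notes on version B (the rewrite author's own statement) =====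
-- stated objective: simpler
-- what changed: A bucket-sorts all indices by first character, builds a first-occurrence rank dict over full triplets, then stably re-sorts the whole annotated index list by rank; B makes one grouping pass (full triplet -> its indices) and stably sorts only the distinct triplets by their first character, concatenating the groups.
-- outside the precondition, e.g. on create_s0('abca', [-2]): A returns [3, -3], B raises IndexError
import Mathlib
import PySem

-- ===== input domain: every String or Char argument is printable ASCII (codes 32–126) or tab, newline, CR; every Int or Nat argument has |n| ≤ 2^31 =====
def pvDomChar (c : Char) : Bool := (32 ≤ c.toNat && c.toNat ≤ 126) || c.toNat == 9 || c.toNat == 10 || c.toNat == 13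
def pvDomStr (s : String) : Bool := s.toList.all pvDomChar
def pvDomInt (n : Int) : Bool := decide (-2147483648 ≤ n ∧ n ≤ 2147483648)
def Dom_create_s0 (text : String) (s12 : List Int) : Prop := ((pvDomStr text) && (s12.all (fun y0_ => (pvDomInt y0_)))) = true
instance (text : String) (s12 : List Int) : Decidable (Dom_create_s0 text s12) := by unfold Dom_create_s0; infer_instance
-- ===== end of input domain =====

-- B replaces A's per-element bucket pass + rank dict + full stable sort by ONE grouping
-- pass over the indices plus a stable sort of only the DISTINCT triplets (objective: simpler).

-- ===== PORT A =====

-- get_triplet(text, idx): chars text[idx], …; the trailing '$'-padding while-loop is dead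
-- code in A (guarded by isinstance(list, str), never true) and is omitted.
-- pyGet? = none is Python's IndexError (excluded by Pre_); .getD ' ' only totalizes.
def pvGetTriplet (tl : List Char) (idx : Int) : List Char :=
  (PySem.List.pyRange idx (min (idx + 3) (tl.length : Int)) 1).map
    (fun ti => (PySem.List.pyGet? tl ti).getD ' ')

-- bucketsort(current_text, sa, s0): dict-valued buckets; the Python idiom
-- "if k not in buckets: buckets[k] = []; buckets[k].append(v)" is Dict.modify k [] (· ++ [v]).
-- ranks keys are the joined triplet strings; two triplets join equal iff the char lists are
-- equal, so the keys are kept as List Char. ranks.get returns Option (None never compared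
-- here); the final caller's sort key totalizes it with .getD 0.
def pvBucketsort (tl : List Char) (sa : List Int) (s0 : Bool) : List (Option Int × Int) :=
  let triplet_idx : Int := if s0 then 0 else 2
  let sorted_sa := (PySem.List.pyRange triplet_idx (-1) (-1)).foldl
    (fun sorted_sa i =>
      let buckets := sorted_sa.foldl
        (fun (b : PySem.Dict Char (List Int)) text_idx =>
          let triplet := pvGetTriplet tl text_idx
          let checked_i : Int := if i < (triplet.length : Int) then i else (triplet.length : Int) - 1
          b.modify ((PySem.List.pyGet? triplet checked_i).getD ' ') [] (· ++ [text_idx]))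
        PySem.Dict.empty
      (PySem.List.sorted buckets.keys (fun k => k) false).foldl
        (fun acc key => acc ++ buckets.getD key []) [])
    sa
  let ranks := sorted_sa.foldl
    (fun (p : PySem.Dict (List Char) Int × Int) text_idx =>
      if p.1.contains (pvGetTriplet tl text_idx) then p
      else (p.1.insert (pvGetTriplet tl text_idx) p.2, p.2 + 1))
    (PySem.Dict.empty, 1)
  sa.map (fun idx_original => (ranks.1.get? (pvGetTriplet tl idx_original), idx_original))

def create_s0 (text : String) (s12 : List Int) : List Int :=
  let tl := text.toList
  let s0_unsorted := s12.foldl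
    (fun acc idx_text => if PySem.Int.mod (idx_text - 1) 3 = 0 then acc ++ [idx_text - 1] else acc) []
  let s0_unsorted := if PySem.Int.mod (tl.length : Int) 3 = 1
    then PySem.List.insert s0_unsorted 0 ((tl.length : Int) - 1) else s0_unsorted
  let s0_with_ranks := pvBucketsort tl s0_unsorted true
  (PySem.List.sorted s0_with_ranks (fun x => x.1.getD 0) false).map (fun x => x.2)

-- ===== PORT B =====

-- one grouping pass (full triplet -> indices, groups in first-appearance order:
-- setdefault+append = Dict.modify t [] (· ++ [idx])), then a stable sort of the distinct
-- triplets by their first character t[0] (pyGet? none is Python's IndexError on an empty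
-- slice, excluded by Pre_; .getD ' ' only totalizes).
def create_s0_alt (text : String) (s12 : List Int) : List Int :=
  let tl := text.toList
  let n : Int := tl.length
  let s0 := s12.filterMap (fun x => if PySem.Int.mod (x - 1) 3 = 0 then some (x - 1) else none)
  let s0 := if PySem.Int.mod n 3 = 1 then (n - 1) :: s0 else s0
  let groups := s0.foldl
    (fun (d : PySem.Dict (List Char) (List Int)) idx =>
      d.modify (PySem.List.slice tl (some idx) (some (idx + 3))) [] (· ++ [idx]))
    PySem.Dict.empty
  (PySem.List.sorted groups.keys (fun t => (PySem.List.pyGet? t 0).getD ' ') false).foldl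
    (fun acc t => acc ++ groups.getD t []) []

-- ===== PRECONDITION & SPEC =====

-- Pre_ admits exactly the inputs whose derived indices x-1 (for entries with (x-1)%3 == 0)
-- fall inside [0, len(text)). Outside it A raises IndexError (index ≥ len or < -len) or
-- returns a value assembled from Python's negative-index wraparound, and B itself raises
-- IndexError there (its triplet slice is empty, so the sort key t[0] fails).
def Pre_create_s0 (text : String) (s12 : List Int) : Prop :=
  ∀ x ∈ s12, PySem.Int.mod (x - 1) 3 = 0 → 0 ≤ x - 1 ∧ x - 1 < (text.toList.length : Int)
instance (text : String) (s12 : List Int) : Decidable (Pre_create_s0 text s12) := by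
  unfold Pre_create_s0; infer_instance

def pvWitness_create_s0 : String × List Int := ("abca", [1, 4])

def Spec_create_s0 (text : String) (s12 : List Int) (out : List Int) : Prop := out = create_s0_alt text s12
instance (text : String) (s12 : List Int) (out : List Int) : Decidable (Spec_create_s0 text s12 out) := by unfold Spec_create_s0; infer_instance

-- ===== CLAIM (what is proved, stated in full; the proofs are below) =====
def Claim_equal_create_s0 : Prop := ∀ (text : String) (s12 : List Int), Dom_create_s0 text s12 → Pre_create_s0 text s12 → Spec_create_s0 text s12 (create_s0 text s12)

-- ===== LEMMAS AND PROOFS =====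

-- ---- general facts about Python's stable sort, dedup and grouping folds ----

theorem pv_filter_decomp {κ : Type} [LinearOrder κ] (c : κ) :
    ∀ (l : List κ), l.Pairwise (· ≤ ·) →
      l = l.filter (fun v => decide (v ≤ c)) ++ l.filter (fun v => decide (c < v)) := by
  intro l
  induction l with
  | nil => intro _; rfl
  | cons x t ih =>
    intro hp
    rcases List.pairwise_cons.mp hp with ⟨hx, ht⟩
    by_cases hxc : x ≤ c
    · simp only [List.filter_cons, hxc, decide_true, not_lt.mpr hxc, decide_false]
      simpa using congrArg (x :: ·) (ih ht)
    · rw [not_le] at hxc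
      have h1 : t.filter (fun v => decide (v ≤ c)) = [] :=
        List.filter_eq_nil_iff.mpr (fun a ha => by
          simpa using not_le.mpr (lt_of_lt_of_le hxc (hx a ha)))
      have h0 : (x :: t).filter (fun v => decide (v ≤ c)) = [] := by
        simp [not_le.mpr hxc, h1]
      have h2 : t.filter (fun v => decide (c < v)) = t :=
        List.filter_eq_self.mpr (fun a ha => by simpa using lt_of_lt_of_le hxc (hx a ha))
      rw [h0]
      simp [hxc, h2]

theorem pv_insertBy_cons_pos {α : Type} (before : α → α → Bool) (x y : α) (ys : List α)
    (h : before x y = true) :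
    PySem.List.insertBy before x (y :: ys) = x :: y :: ys := by
  simp [PySem.List.insertBy, h]

theorem pv_insertBy_cons_neg {α : Type} (before : α → α → Bool) (x y : α) (ys : List α)
    (h : before x y = false) :
    PySem.List.insertBy before x (y :: ys) = y :: PySem.List.insertBy before x ys := by
  simp [PySem.List.insertBy, h]

theorem pv_insertBy_append {α : Type} (before : α → α → Bool) (x : α) (l1 l2 : List α)
    (h : ∀ y ∈ l1, before x y = false) :
    PySem.List.insertBy before x (l1 ++ l2) = l1 ++ PySem.List.insertBy before x l2 := by
  induction l1 with
  | nil => simp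
  | cons a t ih =>
    have ha : before x a = false := h a (by simp)
    rw [List.cons_append, pv_insertBy_cons_neg _ _ _ _ ha,
      ih (fun y hy => h y (by simp [hy])), List.cons_append]

-- x lands after every element it is not strictly before
theorem pv_insertBy_split {α : Type} (before : α → α → Bool) (x : α) (l1 l2 : List α)
    (h1 : ∀ y ∈ l1, before x y = false)
    (h2 : ∀ y ∈ l2.head?, before x y = true) :
    PySem.List.insertBy before x (l1 ++ l2) = l1 ++ x :: l2 := by
  rw [pv_insertBy_append _ _ _ _ h1]
  cases l2 with
  | nil => simp [PySem.List.insertBy]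
  | cons b t => rw [pv_insertBy_cons_pos _ _ _ _ (h2 b rfl)]

theorem pv_mem_last {κ : Type} [LinearOrder κ] :
    ∀ {l : List κ} {c : κ}, l.Pairwise (· ≤ ·) → l.Nodup → (∀ v ∈ l, v ≤ c) → c ∈ l →
      ∃ E, l = E ++ [c] ∧ c ∉ E := by
  intro l
  induction l with
  | nil => intro c _ _ _ hc; simp at hc
  | cons a t ih =>
    intro c hp hnd hall hc
    rcases List.pairwise_cons.mp hp with ⟨ha, ht⟩
    rcases List.nodup_cons.mp hnd with ⟨hna, hndt⟩
    by_cases hct : c ∈ t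
    · rcases ih ht hndt (fun v hv => hall v (by simp [hv])) hct with ⟨E, hE, hcE⟩
      refine ⟨a :: E, by simp [hE], ?_⟩
      intro hmem
      rcases List.mem_cons.mp hmem with h | h
      · exact hna (h ▸ hct)
      · exact hcE h
    · have hac : a = c := by
        rcases List.mem_cons.mp hc with h | h
        · exact h.symm
        · exact absurd h hct
      subst hac
      cases t with
      | nil => exact ⟨[], rfl, by simp⟩
      | cons b t' =>
        have hb : b = a := le_antisymm (hall b (by simp)) (ha b (by simp))
        exact absurd (hb ▸ List.mem_cons_self) hna

theorem pv_sorted_snoc {α κ : Type} [LT κ] [DecidableLT κ] (xs : List α) (x : α) (key : α → κ) :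
    PySem.List.sorted (xs ++ [x]) key
      = PySem.List.insertBy (fun a b => decide (key a < key b)) x (PySem.List.sorted xs key) := by
  rw [PySem.List.sorted_eq_foldl_insertBy, PySem.List.sorted_eq_foldl_insertBy,
    List.foldl_append]
  rfl

theorem pv_add_of_not_mem {κ : Type} [BEq κ] [LawfulBEq κ] {s : PySem.Set κ} {x : κ}
    (h : x ∉ s) : s.add x = s ++ [x] := by
  have hc : s.contains x = false := by
    rw [Bool.eq_false_iff]
    intro hc
    exact h ((PySem.Set.contains_iff s x).mp hc)
  rw [PySem.Set.add, hc]
  simp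

theorem pv_dedup_snoc {κ : Type} [BEq κ] [LawfulBEq κ] (m : List κ) (c : κ) :
    PySem.List.dedup (m ++ [c])
      = if c ∈ m then PySem.List.dedup m else PySem.List.dedup m ++ [c] := by
  have h1 : PySem.List.dedup (m ++ [c]) = (PySem.Set.ofList m).add c := by
    simp [PySem.List.dedup, PySem.Set.ofList_append, PySem.Set.update]
  rw [h1]
  by_cases hc : c ∈ m
  · rw [if_pos hc]
    exact PySem.Set.add_of_mem ((PySem.List.mem_dedup m c).mpr hc)
  · rw [if_neg hc]
    exact pv_add_of_not_mem (fun hmem => hc ((PySem.List.mem_dedup m c).mp hmem))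

theorem pv_sorted_classes {α κ : Type} [LinearOrder κ] [BEq κ] [LawfulBEq κ]
    (xs : List α) (key : α → κ) :
    PySem.List.sorted xs key
      = (PySem.List.sorted (PySem.List.dedup (xs.map key)) (fun v => v)).flatMap
          (fun v => xs.filter (fun a => key a == v)) := by
  induction xs using List.reverseRecOn with
  | nil => rfl
  | append_singleton xs x ih =>
    set kx := key x with hkx
    -- the sorted distinct keys of xs
    set D := PySem.List.sorted (PySem.List.dedup (xs.map key)) (fun v => v) with hD
    have hDnd : D.Nodup :=
      ((PySem.List.sorted_perm _ _ _).nodup_iff).mpr (PySem.List.nodup_dedup _)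
    have hDle : D.Pairwise (· ≤ ·) := PySem.List.sorted_pairwise _ _
    have hDmem : ∀ v, v ∈ D ↔ v ∈ xs.map key := by
      intro v
      rw [hD, PySem.List.mem_sorted, PySem.List.mem_dedup]
    set D1 := D.filter (fun v => decide (v ≤ kx)) with hD1
    set D2 := D.filter (fun v => decide (kx < v)) with hD2
    have hsplit : D = D1 ++ D2 := pv_filter_decomp kx D hDle
    have hD1le : ∀ v ∈ D1, v ≤ kx := by
      intro v hv; simpa using List.of_mem_filter hv
    have hD2gt : ∀ v ∈ D2, kx < v := by
      intro v hv; simpa using List.of_mem_filter hv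
    set F := fun v => xs.filter (fun a => key a == v) with hF
    set F' := fun v => (xs ++ [x]).filter (fun a => key a == v) with hF'
    have hF'F : ∀ v, F' v = F v ++ if kx == v then [x] else [] := by
      intro v
      rw [hF', hF]
      simp only [List.filter_append]
      congr 1
      by_cases hv : key x = v
      · simp [hkx, hv]
      · have : (key x == v) = false := by simpa using hv
        simp [List.filter_cons, ← hkx]
    have hF'ne : ∀ v, v ≠ kx → F' v = F v := by
      intro v hv
      rw [hF'F]
      have : (kx == v) = false := by simpa using fun h => hv h.symm
      simp [this]
    have hkeyF : ∀ v, ∀ y ∈ F v, key y = v := by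
      intro v y hy
      simpa using List.of_mem_filter hy
    -- the insertion position of x inside the concatenation of classes
    have hbefore1 : ∀ y ∈ D1.flatMap F, decide (key x < key y) = false := by
      intro y hy
      rcases List.mem_flatMap.mp hy with ⟨v, hv, hyv⟩
      rw [hkeyF v y hyv]
      simpa [hkx] using not_lt.mpr (hD1le v hv)
    have hbefore2 : ∀ y ∈ D2.flatMap F, decide (key x < key y) = true := by
      intro y hy
      rcases List.mem_flatMap.mp hy with ⟨v, hv, hyv⟩
      rw [hkeyF v y hyv]
      simpa [hkx] using hD2gt v hv
    have hLHS : PySem.List.sorted (xs ++ [x]) key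
        = D1.flatMap F ++ x :: D2.flatMap F := by
      rw [pv_sorted_snoc, ih, hsplit, List.flatMap_append]
      apply pv_insertBy_split
      · exact hbefore1
      · intro y hy
        cases hhd : D2.flatMap F with
        | nil => rw [hhd] at hy; simp at hy
        | cons b t =>
          rw [hhd] at hy
          simp only [List.head?_cons, Option.mem_def, Option.some.injEq] at hy
          subst hy
          exact hbefore2 b (hhd ▸ List.mem_cons_self)

    rw [hLHS]
    -- now the right-hand side
    rw [List.map_append, List.map_singleton, pv_dedup_snoc]
    by_cases hmem : kx ∈ PySem.List.dedup (xs.map key)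
    · -- key x already occurs: same distinct keys, x joins the end of its class
      rw [if_pos (by simpa [hkx] using hmem), ← hD, hsplit, List.flatMap_append]
      have hkxD1 : kx ∈ D1 := by
        rw [hD1]
        exact List.mem_filter.mpr ⟨(hDmem kx).mpr (by simpa using hmem), by simp⟩
      rcases pv_mem_last (List.Pairwise.filter _ hDle) (List.Nodup.filter _ hDnd) hD1le hkxD1
        with ⟨E, hE, hkxE⟩
      have hneE : ∀ v ∈ E, F' v = F v := by
        intro v hv
        exact hF'ne v (fun hveq => hkxE (hveq ▸ hv))
      have hneD2 : ∀ v ∈ D2, F' v = F v := by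
        intro v hv
        exact hF'ne v (fun hveq => absurd (hveq ▸ hD2gt v hv) (lt_irrefl kx))
      have hE' : D1 = E ++ [kx] := hE
      have hD1' : D1.flatMap F' = D1.flatMap F ++ [x] := by
        rw [hE', List.flatMap_append, List.flatMap_append, List.flatMap_congr hneE]
        simp [hF'F, hF]
      rw [hD1', List.flatMap_congr hneD2]
      simp
    · -- key x is new: it forms its own singleton class at its sorted position
      rw [if_neg (by simpa [hkx] using hmem), ← hkx]
      have hDsnoc : PySem.List.sorted (PySem.List.dedup (List.map key xs) ++ [kx]) (fun v => v)
          = D1 ++ kx :: D2 := by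
        rw [pv_sorted_snoc, ← hD, hsplit]
        apply pv_insertBy_split
        · intro y hy; simpa using not_lt.mpr (hD1le y hy)
        · intro y hy
          cases hhd : D2 with
          | nil => rw [hhd] at hy; simp at hy
          | cons b t =>
            rw [hhd] at hy
            simp only [List.head?_cons, Option.mem_def, Option.some.injEq] at hy
            subst hy
            simpa using hD2gt b (hhd ▸ List.mem_cons_self)
      rw [hDsnoc, List.flatMap_append, List.flatMap_cons]
      have hkxnotin : kx ∉ List.map key xs := by
        intro h
        exact hmem (by simpa using (PySem.List.mem_dedup (List.map key xs) kx).mpr h)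
      have hFkx : F' kx = [x] := by
        rw [hF'F]
        have : F kx = [] := by
          apply List.filter_eq_nil_iff.mpr
          intro a ha h
          exact hkxnotin (by
            have : key a = kx := by simpa using h
            exact this ▸ List.mem_map_of_mem ha)
        simp [this]
      have hneD1 : ∀ v ∈ D1, F' v = F v := by
        intro v hv
        refine hF'ne v (fun hveq => ?_)
        exact hkxnotin (hveq ▸ (hDmem v).mp (List.mem_of_mem_filter hv))
      have hneD2 : ∀ v ∈ D2, F' v = F v := by
        intro v hv
        exact hF'ne v (fun hveq => absurd (hveq ▸ hD2gt v hv) (lt_irrefl kx))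
      rw [List.flatMap_congr hneD1, List.flatMap_congr hneD2, hFkx]
      simp

theorem pv_dedup_filter {κ : Type} [BEq κ] [LawfulBEq κ] (p : κ → Bool) :
    ∀ (l : List κ), PySem.List.dedup (l.filter p) = (PySem.List.dedup l).filter p := by
  intro l
  induction l with
  | nil => rfl
  | cons x t ih =>
    show PySem.List.dedup ((x :: t).filter p) = (PySem.Set.ofList (x :: t)).filter p
    rw [PySem.Set.ofList_cons, List.filter_cons]
    by_cases hp : p x
    · rw [if_pos hp, show PySem.List.dedup (x :: t.filter p) = PySem.Set.ofList (x :: t.filter p) from rfl,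
        PySem.Set.ofList_cons, List.filter_cons, if_pos hp]
      congr 1
      show ((PySem.Set.ofList (t.filter p)).filter (fun y => !y == x)) = _
      rw [show PySem.Set.ofList (t.filter p) = PySem.List.dedup (t.filter p) from rfl, ih]
      rw [List.filter_comm]
      rfl
    · rw [if_neg hp, ih, List.filter_cons, if_neg hp]
      show (PySem.List.dedup t).filter p = ((PySem.List.dedup t).filter (fun y => !y == x)).filter p
      rw [List.filter_comm]
      have : ((PySem.List.dedup t).filter p).filter (fun y => !y == x)
          = ((PySem.List.dedup t).filter p) := by
        apply List.filter_eq_self.mpr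
        intro a ha
        have hpa : p a = true := List.of_mem_filter ha
        simp only [Bool.not_eq_eq_eq_not, Bool.not_true, beq_eq_false_iff_ne, ne_eq]
        intro haeq
        rw [haeq] at hpa
        exact absurd hpa (by simpa using hp)
      rw [this]

theorem pv_update_eq_append {κ : Type} [BEq κ] [LawfulBEq κ] :
    ∀ (l : List κ) (s : PySem.Set κ),
      PySem.Set.update s l = s ++ PySem.List.dedup (l.filter (fun a => !s.contains a)) := by
  intro l
  induction l with
  | nil => intro s; simp [PySem.Set.update_nil]
  | cons x t ih =>
    intro s
    have hstep : PySem.Set.update s (x :: t) = PySem.Set.update (s.add x) t := rfl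
    rw [hstep, ih]
    by_cases hx : x ∈ s
    · rw [PySem.Set.add_of_mem hx]
      congr 2
      rw [List.filter_cons]
      have : (!s.contains x) = false := by
        simpa using (PySem.Set.contains_iff s x).mpr hx
      rw [this]
      simp
    · have hadd : s.add x = s ++ [x] := by
        have hc : s.contains x = false := by
          rw [Bool.eq_false_iff]; intro h; exact hx ((PySem.Set.contains_iff s x).mp h)
        rw [PySem.Set.add, hc]
        simp only [Bool.false_eq_true, if_false]
      rw [hadd, List.append_assoc]
      congr 1
      have hcx : (!s.contains x) = true := by
        have hc : s.contains x = false := by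
          rw [Bool.eq_false_iff]; intro h; exact hx ((PySem.Set.contains_iff s x).mp h)
        rw [hc]
        rfl
      rw [List.filter_cons, hcx, if_pos rfl]
      rw [show PySem.List.dedup (x :: t.filter (fun a => !s.contains a))
          = PySem.Set.ofList (x :: t.filter (fun a => !s.contains a)) from rfl,
        PySem.Set.ofList_cons]
      rw [List.singleton_append]
      congr 1
      show PySem.List.dedup (List.filter (fun a => !(s ++ [x]).contains a) t)
          = (PySem.Set.ofList (t.filter fun a => !s.contains a)).filter (fun y => !y == x)
      rw [show PySem.Set.ofList (t.filter fun a => !s.contains a)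
          = PySem.List.dedup (t.filter fun a => !s.contains a) from rfl]
      rw [← pv_dedup_filter, List.filter_filter]
      congr 1
      apply List.filter_congr
      intro a _
      show (!(s ++ [x]).contains a) = ((!a == x) && (!s.contains a))
      cases hsa : s.contains a <;> cases hax : a == x <;>
        simp_all

theorem pv_dedup_append_disjoint {κ : Type} [BEq κ] [LawfulBEq κ] (l1 l2 : List κ)
    (h : ∀ a ∈ l2, a ∉ l1) :
    PySem.List.dedup (l1 ++ l2) = PySem.List.dedup l1 ++ PySem.List.dedup l2 := by
  rw [show PySem.List.dedup (l1 ++ l2) = PySem.Set.ofList (l1 ++ l2) from rfl,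
    PySem.Set.ofList_append,
    pv_update_eq_append]
  congr 2
  apply List.filter_eq_self.mpr
  intro a ha
  have : (PySem.Set.ofList l1).contains a = false := by
    rw [Bool.eq_false_iff]
    intro hc
    exact h a ha ((PySem.List.mem_dedup l1 a).mp ((PySem.Set.contains_iff _ a).mp hc))
  rw [this]
  rfl

theorem pv_dedup_flatMap {κ β : Type} [BEq β] [LawfulBEq β] [DecidableEq κ]
    (g : β → κ) :
    ∀ (cs : List κ) (F : κ → List β), cs.Nodup → (∀ c ∈ cs, ∀ b ∈ F c, g b = c) →
      PySem.List.dedup (cs.flatMap F) = cs.flatMap (fun c => PySem.List.dedup (F c)) := by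
  intro cs
  induction cs with
  | nil => intro F _ _; rfl
  | cons c t ih =>
    intro F hnd hF
    rcases List.nodup_cons.mp hnd with ⟨hct, hndt⟩
    rw [List.flatMap_cons, List.flatMap_cons,
      pv_dedup_append_disjoint _ _ (fun a ha hmem => ?_), ih F hndt (fun c' hc' => hF c' (by simp [hc']))]
    -- a ∈ t.flatMap F but also a ∈ F c: contradiction via g
    rcases List.mem_flatMap.mp ha with ⟨c', hc', ha'⟩
    have h1 : g a = c' := hF c' (by simp [hc']) a ha'
    have h2 : g a = c := hF c (by simp) a hmem
    have : c = c' := h2 ▸ h1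
    exact hct (this ▸ hc')

-- first-occurrence rank dictionary: enumerate the distinct keys from r upward
def pvEnum {κ : Type} (r : Int) : List κ → List (κ × Int)
  | [] => []
  | x :: t => (x, r) :: pvEnum (r + 1) t

theorem pv_rank_fold_items {ι κ : Type} [BEq κ] [LawfulBEq κ] (f : ι → κ) :
    ∀ (l : List ι) (d : PySem.Dict κ Int) (r : Int),
      (l.foldl (fun p x => if p.1.contains (f x) then p else (p.1.insert (f x) p.2, p.2 + 1)) (d, r)).1.items
        = d.items ++ pvEnum r (PySem.List.dedup ((l.map f).filter (fun t => !d.contains t))) := by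
  intro l
  induction l with
  | nil => intro d r; simp [pvEnum]
  | cons x t ih =>
    intro d r
    rw [List.foldl_cons]
    by_cases hc : d.contains (f x)
    · rw [if_pos hc, ih]
      congr 3
      rw [List.map_cons, List.filter_cons]
      have : (!d.contains (f x)) = false := by rw [hc]; rfl
      rw [this]
      simp
    · have hcf : d.contains (f x) = false := by rw [Bool.eq_false_iff]; exact hc
      rw [if_neg (by rw [hcf]; simp), ih,
        PySem.Dict.items_insert_of_not_contains d r hcf, List.append_assoc]
      congr 1
      rw [List.map_cons, List.filter_cons]
      have hx : (!d.contains (f x)) = true := by rw [hcf]; rfl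
      rw [hx, if_pos rfl]
      rw [show PySem.List.dedup (f x :: (t.map f).filter (fun a => !d.contains a))
          = PySem.Set.ofList (f x :: (t.map f).filter (fun a => !d.contains a)) from rfl,
        PySem.Set.ofList_cons]
      rw [show (pvEnum r ((f x) :: ((PySem.Set.ofList ((t.map f).filter (fun a => !d.contains a))).discard (f x)))) = ((f x), r) :: pvEnum (r+1) ((PySem.Set.ofList ((t.map f).filter (fun a => !d.contains a))).discard (f x)) from rfl]
      rw [List.singleton_append]
      congr 1
      -- remaining: enumerate the tail with keys ≠ f x = keys not in d.insert (f x) r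
      congr 1
      show PySem.List.dedup ((t.map f).filter (fun a => !(d.insert (f x) r).contains a))
          = (PySem.List.dedup ((t.map f).filter (fun a => !d.contains a))).filter (fun y => !y == f x)
      rw [← pv_dedup_filter, List.filter_filter]
      congr 1
      apply List.filter_congr
      intro a _
      show (!(d.insert (f x) r).contains a) = ((!a == f x) && (!d.contains a))
      rw [PySem.Dict.contains_insert]
      cases hax : a == f x <;> cases hda : d.contains a <;> simp_all

theorem pv_enum_mem {κ : Type} :
    ∀ (E : List κ) (r : Int) (i : Nat) (h : i < E.length), (E[i], r + (i : Int)) ∈ pvEnum r E := by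
  intro E
  induction E with
  | nil => intro r i h; simp at h
  | cons x t ih =>
    intro r i h
    cases i with
    | zero => simp [pvEnum]
    | succ j =>
      have := ih (r + 1) j (by simpa using h)
      rw [pvEnum]
      refine List.mem_cons_of_mem _ ?_
      have harith : r + ((j : Int) + 1) = r + 1 + (j : Int) := by ring
      simpa [harith] using this

theorem pv_enum_fst {κ : Type} :
    ∀ (E : List κ) (r : Int), (pvEnum r E).map Prod.fst = E := by
  intro E
  induction E with
  | nil => intro r; rfl
  | cons x t ih => intro r; simp [pvEnum, ih]

theorem pv_rank_get? {ι κ : Type} [BEq κ] [LawfulBEq κ] (f : ι → κ) (l : List ι) (t : κ)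
    (ht : t ∈ PySem.List.dedup (l.map f)) :
    (l.foldl (fun p x => if p.1.contains (f x) then p else (p.1.insert (f x) p.2, p.2 + 1))
        ((PySem.Dict.empty : PySem.Dict κ Int), 1)).1.get? t
      = some (1 + ((PySem.List.dedup (l.map f)).idxOf t : Int)) := by
  have hitems := pv_rank_fold_items f l PySem.Dict.empty 1
  have hfl : (l.map f).filter (fun t => !(PySem.Dict.empty : PySem.Dict κ Int).contains t) = l.map f := by
    apply List.filter_eq_self.mpr
    intro a _
    rw [PySem.Dict.contains_empty]
    rfl
  rw [hfl] at hitems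
  set E := PySem.List.dedup (l.map f) with hE
  have hidx : E.idxOf t < E.length := List.idxOf_lt_length_iff.mpr ht
  have hmem : (t, 1 + (E.idxOf t : Int)) ∈
      (l.foldl (fun p x => if p.1.contains (f x) then p else (p.1.insert (f x) p.2, p.2 + 1))
        ((PySem.Dict.empty : PySem.Dict κ Int), 1)).1.items := by
    rw [hitems]
    have := pv_enum_mem E 1 (E.idxOf t) hidx
    rw [List.getElem_idxOf hidx] at this
    rw [show (PySem.Dict.empty : PySem.Dict κ Int).items = [] from rfl, List.nil_append]
    exact this
  apply PySem.Dict.get?_of_mem_items _ hmem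
  show ((l.foldl (fun p x => if p.1.contains (f x) then p else (p.1.insert (f x) p.2, p.2 + 1))
      ((PySem.Dict.empty : PySem.Dict κ Int), 1)).1.items.map Prod.fst).Nodup
  rw [hitems, show (PySem.Dict.empty : PySem.Dict κ Int).items = [] from rfl, List.nil_append,
    pv_enum_fst]
  exact hE ▸ PySem.List.nodup_dedup (l.map f)

-- ---- facts specific to the two ports ----

theorem pv_s0_fold (l : List Int) (acc : List Int) :
    l.foldl (fun acc x => if PySem.Int.mod (x - 1) 3 = 0 then acc ++ [x - 1] else acc) acc
      = acc ++ l.filterMap (fun x => if PySem.Int.mod (x - 1) 3 = 0 then some (x - 1) else none) := by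
  induction l generalizing acc with
  | nil => simp
  | cons x t ih =>
    rw [List.foldl_cons, List.filterMap_cons]
    by_cases h : PySem.Int.mod (x - 1) 3 = 0
    · rw [if_pos h, if_pos h, ih]
      simp
    · rw [if_neg h, if_neg h, ih]

theorem pv_triplet_eq (tl : List Char) (x : Int) (h0 : 0 ≤ x) (hn : x < (tl.length : Int)) :
    pvGetTriplet tl x = PySem.List.slice tl (some x) (some (x + 3)) := by
  obtain ⟨k, rfl⟩ : ∃ k : Nat, x = (k : Int) := ⟨x.toNat, (Int.toNat_of_nonneg h0).symm⟩
  have hk : k < tl.length := by exact_mod_cast hn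
  have h3 : (k : Int) + 3 = ((k + 3 : Nat) : Int) := by push_cast; ring
  rw [h3, PySem.List.slice_natCast]
  apply List.ext_getElem
  · simp [pvGetTriplet, PySem.List.length_pyRange_one]
    omega
  · intro i h1 h2
    simp only [pvGetTriplet, List.getElem_map, PySem.List.getElem_pyRange_one]
    have hi : i < tl.length := by
      simp [pvGetTriplet, PySem.List.length_pyRange_one] at h1
      omega
    have hcast : (k : Int) + (i : Int) = ((k + i : Nat) : Int) := by push_cast; ring
    rw [hcast, PySem.List.pyGet?_natCast]
    have hki : k + i < tl.length := by
      simp [pvGetTriplet, PySem.List.length_pyRange_one] at h1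
      omega
    rw [List.getElem?_eq_getElem hki]
    simp


theorem pv_trip_ne_nil (tl : List Char) (x : Int) (h0 : 0 ≤ x) (hn : x < (tl.length : Int)) :
    PySem.List.slice tl (some x) (some (x + 3)) ≠ [] := by
  obtain ⟨k, rfl⟩ : ∃ k : Nat, x = (k : Int) := ⟨x.toNat, (Int.toNat_of_nonneg h0).symm⟩
  have hk : k < tl.length := by exact_mod_cast hn
  have h3 : (k : Int) + 3 = ((k + 3 : Nat) : Int) := by push_cast; ring
  rw [h3, PySem.List.slice_natCast]
  simp only [ne_eq, List.take_eq_nil_iff, List.drop_eq_nil_iff]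
  omega

theorem pv_group_getD {κ : Type} [BEq κ] [LawfulBEq κ] (g : Int → κ) (l : List Int) (c : κ) :
    (l.foldl (fun (d : PySem.Dict κ (List Int)) x => d.modify (g x) [] (· ++ [x])) PySem.Dict.empty).getD c []
      = l.filter (fun x => g x == c) := by
  have h1 : l.foldl (fun (d : PySem.Dict κ (List Int)) x => d.modify (g x) [] (· ++ [x])) PySem.Dict.empty
      = (l.map (fun x => (g x, x))).foldl (fun d p => d.modify p.1 [] (· ++ [p.2])) PySem.Dict.empty := by
    rw [List.foldl_map]
  rw [h1, PySem.Dict.getD_foldl_modify_append, List.filter_map]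
  simp [Function.comp_def]

theorem pv_group_keys {κ : Type} [BEq κ] [LawfulBEq κ] (g : Int → κ) (l : List Int) :
    (l.foldl (fun (d : PySem.Dict κ (List Int)) x => d.modify (g x) [] (· ++ [x])) PySem.Dict.empty).keys
      = PySem.List.dedup (l.map g) := by
  rw [PySem.Dict.keys_foldl_modify_key l g [] (fun d x v => v ++ [x]) PySem.Dict.empty]
  rfl

-- ===== VERDICT (by name: the statement is the Claim_ definition above) =====
theorem create_s0_spec : Claim_equal_create_s0 := by
  intro text s12 _hdom hpre
  show create_s0 text s12 = create_s0_alt text s12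
  -- shared notation
  set tl := text.toList with htldef
  set n : Int := (tl.length : Int) with hn
  set base := s12.filterMap (fun x => if PySem.Int.mod (x - 1) 3 = 0 then some (x - 1) else none)
    with hbase
  set s0 := (if PySem.Int.mod n 3 = 1 then (n - 1) :: base else base) with hs0
  set trip := fun x : Int => PySem.List.slice tl (some x) (some (x + 3)) with htrip
  set fc := fun t : List Char => (PySem.List.pyGet? t (0 : Int)).getD ' ' with hfc
  set gA := fun x : Int => fc (trip x) with hgA
  -- every index in s0 is a real text position
  have hb : ∀ x ∈ s0, 0 ≤ x ∧ x < n := by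
    intro x hx
    rw [hs0] at hx
    have hbase_mem : x ∈ base → 0 ≤ x ∧ x < n := by
      intro hxb
      rw [hbase] at hxb
      rcases List.mem_filterMap.mp hxb with ⟨y, hy, hyx⟩
      by_cases hmody : PySem.Int.mod (y - 1) 3 = 0
      · rw [if_pos hmody] at hyx
        cases hyx
        exact hpre y hy hmody
      · rw [if_neg hmody] at hyx
        cases hyx
    by_cases hmod : PySem.Int.mod n 3 = 1
    · rw [if_pos hmod] at hx
      rcases List.mem_cons.mp hx with h | h
      · subst h
        have hne : n ≠ 0 := by
          intro h0
          rw [h0] at hmod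
          simp [PySem.Int.mod] at hmod
        have hnn : 0 ≤ n := by rw [hn]; exact_mod_cast Nat.zero_le _
        constructor <;> omega
      · exact hbase_mem h
    · rw [if_neg hmod] at hx
      exact hbase_mem hx
  -- A's s0_unsorted and B's s0 are the same list
  have hA0 : create_s0 text s12
      = (PySem.List.sorted (pvBucketsort tl s0 true) (fun x => x.1.getD 0) false).map (fun x => x.2) := by
    unfold create_s0
    dsimp only
    rw [pv_s0_fold, List.nil_append, ← hbase, ← hn]
    by_cases hmod : PySem.Int.mod n 3 = 1
    · rw [if_pos hmod, PySem.List.insert_zero, hs0, if_pos hmod]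
    · rw [if_neg hmod, hs0, if_neg hmod]
  have hB0 : create_s0_alt text s12
      = (PySem.List.sorted
          ((s0.foldl (fun (d : PySem.Dict (List Char) (List Int)) idx =>
              d.modify (trip idx) [] (· ++ [idx])) PySem.Dict.empty).keys)
          fc false).foldl
          (fun acc t => acc ++ (s0.foldl (fun (d : PySem.Dict (List Char) (List Int)) idx =>
              d.modify (trip idx) [] (· ++ [idx])) PySem.Dict.empty).getD t []) [] := by
    unfold create_s0_alt
    dsimp only
  have hrange : PySem.List.pyRange 0 (-1) (-1) = [(0 : Int)] := by decide
  -- name A's three loop bodies (after the range loop collapses to the single pass i = 0)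
  set bucketBody := fun (b : PySem.Dict Char (List Int)) (text_idx : Int) =>
      b.modify ((PySem.List.pyGet? (pvGetTriplet tl text_idx)
          (if (0 : Int) < ((pvGetTriplet tl text_idx).length : Int) then (0 : Int)
           else ((pvGetTriplet tl text_idx).length : Int) - 1)).getD ' ')
        [] (fun x => x ++ [text_idx]) with hbucketBody
  -- the bucket dict of the pass, and its grouped form
  have hbuckets : s0.foldl bucketBody PySem.Dict.empty
      = s0.foldl (fun (b : PySem.Dict Char (List Int)) x => b.modify (gA x) [] (fun v => v ++ [x]))
          PySem.Dict.empty := by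
    apply PySem.List.foldl_congr_mem
    intro b x hx
    obtain ⟨hx0, hxn⟩ := hb x hx
    rw [hbucketBody]
    dsimp only
    have htr : pvGetTriplet tl x = trip x := pv_triplet_eq tl x hx0 hxn
    have hne : trip x ≠ [] := pv_trip_ne_nil tl x hx0 hxn
    have hlen : (0 : Int) < ((trip x).length : Int) := by
      have := List.length_pos_iff.mpr hne
      exact_mod_cast this
    rw [htr, if_pos hlen, hgA, hfc]
  set CH := PySem.List.sorted (PySem.List.dedup (s0.map gA)) (fun c => c) false with hCH
  set ssa := CH.flatMap (fun c => s0.filter (fun x => gA x == c)) with hssa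
  have hkeysA : (s0.foldl bucketBody PySem.Dict.empty).keys = PySem.List.dedup (s0.map gA) := by
    rw [hbuckets, pv_group_keys]
  have hgetDA : ∀ c, (s0.foldl bucketBody PySem.Dict.empty).getD c []
      = s0.filter (fun x => gA x == c) := by
    intro c
    rw [hbuckets, pv_group_getD]
  have hsorted_sa :
      (PySem.List.sorted (s0.foldl bucketBody PySem.Dict.empty).keys (fun k => k) false).foldl
          (fun acc key => acc ++ (s0.foldl bucketBody PySem.Dict.empty).getD key []) []
        = ssa := by
    rw [PySem.List.foldl_append_eq_flatMap, List.nil_append, hkeysA, hssa, hCH]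
    apply List.flatMap_congr
    intro c _
    exact hgetDA c
  -- membership in the pass output
  have hmss : ∀ x, x ∈ ssa ↔ x ∈ s0 := by
    intro x
    rw [hssa]
    constructor
    · intro hx
      rcases List.mem_flatMap.mp hx with ⟨c, _, hxc⟩
      exact List.mem_of_mem_filter hxc
    · intro hx
      refine List.mem_flatMap.mpr ⟨gA x, ?_, List.mem_filter.mpr ⟨hx, by simp⟩⟩
      rw [hCH, PySem.List.mem_sorted, PySem.List.mem_dedup]
      exact List.mem_map_of_mem hx
  -- the rank dictionary over the pass output
  set rankBody := fun (p : PySem.Dict (List Char) Int × Int) (text_idx : Int) =>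
      if p.1.contains (pvGetTriplet tl text_idx) then p
      else (p.1.insert (pvGetTriplet tl text_idx) p.2, p.2 + 1) with hrankBody
  have hranks : ssa.foldl rankBody (PySem.Dict.empty, 1)
      = ssa.foldl (fun p x => if p.1.contains (trip x) then p
          else (p.1.insert (trip x) p.2, p.2 + 1)) (PySem.Dict.empty, 1) := by
    apply PySem.List.foldl_congr_mem
    intro p x hx
    obtain ⟨hx0, hxn⟩ := hb x ((hmss x).mp hx)
    rw [hrankBody]
    dsimp only
    rw [pv_triplet_eq tl x hx0 hxn]
  set ST := PySem.List.dedup (ssa.map trip) with hST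
  set rk := fun t => 1 + ((ST.idxOf t : Nat) : Int) with hrk
  have hget : ∀ t ∈ ST, (ssa.foldl rankBody (PySem.Dict.empty, 1)).1.get? t = some (rk t) := by
    intro t ht
    rw [hranks, pv_rank_get? trip ssa t (hST ▸ ht), hrk, ← hST]
  -- the pair list A sorts at the end
  have hpairs : s0.map (fun idx => ((ssa.foldl rankBody (PySem.Dict.empty, 1)).1.get? (pvGetTriplet tl idx), idx))
      = s0.map (fun x => (some (rk (trip x)), x)) := by
    apply List.map_congr_left
    intro x hx
    obtain ⟨hx0, hxn⟩ := hb x hx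
    have htmem : trip x ∈ ST := by
      rw [hST, PySem.List.mem_dedup]
      exact List.mem_map_of_mem ((hmss x).mpr hx)
    rw [pv_triplet_eq tl x hx0 hxn, hget (trip x) htmem]
  -- rk is strictly increasing along ST and injective on it
  have hSTnd : ST.Nodup := hST ▸ PySem.List.nodup_dedup _
  have hrkval : ∀ (i : Nat) (h : i < ST.length), rk ST[i] = 1 + (i : Int) := by
    intro i h
    rw [hrk]
    dsimp only
    rw [List.Nodup.idxOf_getElem hSTnd i h]
  have hrkinj : ∀ t ∈ ST, ∀ t' ∈ ST, rk t = rk t' → t = t' := by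
    intro t ht t' ht' heq
    rw [hrk] at heq
    dsimp only at heq
    have : ST.idxOf t = ST.idxOf t' := by omega
    have h1 : ST.idxOf t < ST.length := List.idxOf_lt_length_iff.mpr ht
    have h2 : ST.idxOf t' < ST.length := List.idxOf_lt_length_iff.mpr ht'
    calc t = ST[ST.idxOf t] := (List.getElem_idxOf h1).symm
      _ = ST[ST.idxOf t'] := by congr 1
      _ = t' := List.getElem_idxOf h2
  have hSTmem : ∀ t, t ∈ ST ↔ ∃ x ∈ s0, trip x = t := by
    intro t
    rw [hST, PySem.List.mem_dedup, List.mem_map]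
    constructor
    · rintro ⟨x, hx, rfl⟩; exact ⟨x, (hmss x).mp hx, rfl⟩
    · rintro ⟨x, hx, rfl⟩; exact ⟨x, (hmss x).mpr hx, rfl⟩
  -- A's final stable sort collapses to class concatenation along ST
  have hAfin : create_s0 text s12 = ST.flatMap (fun t => s0.filter (fun x => trip x == t)) := by
    rw [hA0]
    unfold pvBucketsort
    dsimp only
    rw [show (if true = true then (0 : Int) else 2) = 0 from rfl, hrange,
      List.foldl_cons, List.foldl_nil, ← hbucketBody, ← hrankBody, hsorted_sa, hpairs,
      pv_sorted_classes (s0.map (fun x => (some (rk (trip x)), x))) (fun p => p.1.getD 0)]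
    have hkeymap : (s0.map (fun x => ((some (rk (trip x)) : Option Int), x))).map (fun p => p.1.getD 0)
        = s0.map (fun x => rk (trip x)) := by
      rw [List.map_map]
      rfl
    rw [hkeymap]
    have hperm : (ST.map rk).Perm (PySem.List.dedup (s0.map (fun x => rk (trip x)))) := by
      apply (List.perm_ext_iff_of_nodup ?_ (PySem.List.nodup_dedup _)).mpr
      · intro v
        rw [List.mem_map, PySem.List.mem_dedup, List.mem_map]
        constructor
        · rintro ⟨t, ht, rfl⟩
          rcases (hSTmem t).mp ht with ⟨x, hx, rfl⟩
          exact ⟨x, hx, rfl⟩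
        · rintro ⟨x, hx, rfl⟩
          exact ⟨trip x, (hSTmem (trip x)).mpr ⟨x, hx, rfl⟩, rfl⟩
      · exact List.Nodup.map_on (fun t ht t' ht' h => hrkinj t ht t' ht' h) hSTnd
    have hpw : (ST.map rk).Pairwise (· < ·) := by
      rw [List.pairwise_iff_getElem]
      intro i j hi hj hij
      rw [List.getElem_map, List.getElem_map,
        hrkval i (by simpa using hi), hrkval j (by simpa using hj)]
      omega
    rw [PySem.List.sorted_eq_of_perm_of_pairwise_lt _ _ _ hperm hpw, List.flatMap_map,
      List.map_flatMap]
    apply List.flatMap_congr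
    intro t ht
    rw [List.filter_map, List.map_map]
    have hid : ((fun p : Option Int × Int => p.2) ∘ (fun x => ((some (rk (trip x)) : Option Int), x)))
        = fun x : Int => x := rfl
    rw [hid, List.map_id']
    apply List.filter_congr
    intro x hx
    show (rk (trip x) == rk t) = (trip x == t)
    have htx : trip x ∈ ST := (hSTmem (trip x)).mpr ⟨x, hx, rfl⟩
    by_cases heq : trip x = t
    · simp [heq]
    · have : rk (trip x) ≠ rk t := fun h => heq (hrkinj _ htx _ ht h)
      simp [heq, this]
  -- the distinct triplets, grouped by first character
  set E := PySem.List.dedup (s0.map trip) with hE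
  have hEmem : ∀ t, t ∈ E ↔ ∃ x ∈ s0, trip x = t := by
    intro t
    rw [hE, PySem.List.mem_dedup, List.mem_map]
  have hSTdecomp : ST = CH.flatMap (fun c => E.filter (fun t => fc t == c)) := by
    rw [hST, hssa, List.map_flatMap]
    have hblock : ∀ c, (s0.filter (fun x => gA x == c)).map trip
        = (s0.map trip).filter (fun t => fc t == c) := by
      intro c
      rw [List.filter_map]
      rfl
    have hCHnd : CH.Nodup :=
      ((PySem.List.sorted_perm _ _ _).nodup_iff).mpr (PySem.List.nodup_dedup _)
    calc PySem.List.dedup (CH.flatMap fun c => (s0.filter (fun x => gA x == c)).map trip)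
        = PySem.List.dedup (CH.flatMap fun c => (s0.map trip).filter (fun t => fc t == c)) := by
          congr 1
          exact List.flatMap_congr (fun c _ => hblock c)
      _ = CH.flatMap (fun c => PySem.List.dedup ((s0.map trip).filter (fun t => fc t == c))) := by
          apply pv_dedup_flatMap fc CH _ hCHnd
          intro c _ t htc
          simpa using List.of_mem_filter htc
      _ = CH.flatMap (fun c => E.filter (fun t => fc t == c)) := by
          apply List.flatMap_congr
          intro c _
          rw [pv_dedup_filter, hE]
  -- B collapses to the same class concatenation
  have hBfin : create_s0_alt text s12
      = CH.flatMap (fun c => (E.filter (fun t => fc t == c)).flatMap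
          (fun t => s0.filter (fun x => trip x == t))) := by
    rw [hB0, pv_group_keys trip s0, PySem.List.foldl_append_eq_flatMap, List.nil_append, ← hE]
    have hgetDB : ∀ t, (s0.foldl (fun (d : PySem.Dict (List Char) (List Int)) idx =>
        d.modify (trip idx) [] (· ++ [idx])) PySem.Dict.empty).getD t []
          = s0.filter (fun x => trip x == t) := fun t => pv_group_getD trip s0 t
    rw [List.flatMap_congr (fun t _ => hgetDB t),
      pv_sorted_classes E fc]
    have hCH2 : PySem.List.sorted (PySem.List.dedup (E.map fc)) (fun v => v) false = CH := by
      rw [hCH]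
      apply PySem.List.sorted_eq_sorted_of_perm _ _ _ (fun a b h => h)
      apply (List.perm_ext_iff_of_nodup (PySem.List.nodup_dedup _) (PySem.List.nodup_dedup _)).mpr
      intro c
      rw [PySem.List.mem_dedup, PySem.List.mem_dedup, List.mem_map, List.mem_map]
      constructor
      · rintro ⟨t, ht, rfl⟩
        rcases (hEmem t).mp ht with ⟨x, hx, rfl⟩
        exact ⟨x, hx, rfl⟩
      · rintro ⟨x, hx, rfl⟩
        exact ⟨trip x, (hEmem (trip x)).mpr ⟨x, hx, rfl⟩, rfl⟩
    rw [hCH2, List.flatMap_assoc]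
  rw [hAfin, hBfin, hSTdecomp, List.flatMap_assoc]
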